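-- pv_equiv track=rewrite | github.com/Arif159357/CYK-algorithm- | CYK algorithm.py | UpPart
-- ===== SOURCE A (Python) =====
-- def UpPart(a,b,dic):
--     c = []
--     for i in a:
--         for j in b:
--             third = i + j
--             for x in dic:
--                 if third in dic[x]:
--                    c.append(x)
--
--     return c
-- ===== SOURCE B (Python) =====
-- def UpPart(a, b, dic):
--     # Build a reverse index value -> list of keys (in dic order) once,
--     # then each pair (i, j) is a single O(1) lookup.
--     rev = {}
--     for x, vals in dic.items():
--         for v in dict.fromkeys(vals):
--             rev[v] = rev.get(v, []) + [x]
--     c = []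
--     for i in a:
--         for j in b:
--             c.extend(rev.get(i + j, []))
--     return c
-- ===== Notes on version B (the rewrite author's own statement) =====
-- stated objective: faster
-- what changed: B precomputes a reverse index mapping each concatenated value to the list of grammar keys producing it (in dic order, one entry per key), so each (i,j) pair is a single dictionary lookup instead of a scan over every key's production list.
import Mathlib
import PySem

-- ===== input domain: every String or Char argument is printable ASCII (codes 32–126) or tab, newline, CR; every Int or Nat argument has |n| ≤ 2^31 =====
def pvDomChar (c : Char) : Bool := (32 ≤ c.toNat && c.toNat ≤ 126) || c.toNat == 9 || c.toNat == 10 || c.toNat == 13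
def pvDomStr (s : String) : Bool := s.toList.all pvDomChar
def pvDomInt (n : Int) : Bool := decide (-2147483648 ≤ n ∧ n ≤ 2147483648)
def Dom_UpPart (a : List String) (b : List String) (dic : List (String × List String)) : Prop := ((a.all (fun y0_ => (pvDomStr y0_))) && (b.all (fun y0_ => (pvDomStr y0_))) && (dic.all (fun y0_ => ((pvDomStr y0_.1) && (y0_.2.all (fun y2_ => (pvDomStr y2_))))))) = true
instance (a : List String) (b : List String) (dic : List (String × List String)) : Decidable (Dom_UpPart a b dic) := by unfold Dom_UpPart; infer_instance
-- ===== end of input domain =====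

-- B builds a reverse index value -> keys once, turning the inner scan over dic into one lookup per pair (faster, asymptotic).


-- ===== PORT A =====
def UpPart (a : List String) (b : List String) (dic : List (String × List String)) : List String :=
  let d := PySem.Dict.mk dic
  a.foldl (fun c i =>
    b.foldl (fun c j =>
      let third := i ++ j
      d.keys.foldl (fun c x =>
        if third ∈ d.getD x [] then c ++ [x] else c) c) c) []

-- ===== PORT B =====
def UpPart_alt (a : List String) (b : List String) (dic : List (String × List String)) : List String :=
  let rev : PySem.Dict String (List String) :=
    dic.foldl (fun rev x =>
      (PySem.List.dedup x.2).foldl (fun rev v =>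
        PySem.Dict.modify rev v [] (· ++ [x.1])) rev) PySem.Dict.empty
  a.foldl (fun c i =>
    b.foldl (fun c j => c ++ rev.getD (i ++ j) []) c) []

-- ===== PRECONDITION & SPEC =====
-- Pre_ excludes association lists with duplicate keys: they do not arise from any Python dict
-- (a Python dict has unique keys), so A's behaviour there is an artefact of the encoding.
def Pre_UpPart (a : List String) (b : List String) (dic : List (String × List String)) : Prop :=
  (dic.map Prod.fst).Nodup
instance (a : List String) (b : List String) (dic : List (String × List String)) : Decidable (Pre_UpPart a b dic) := by unfold Pre_UpPart; infer_instance
def pvWitness_UpPart : List String × List String × (List (String × List String)) :=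
  (["a"], ["b"], [("S", ["ab"]), ("X", ["ba", "ab"])])

def Spec_UpPart (a : List String) (b : List String) (dic : List (String × List String)) (out : List String) : Prop := out = UpPart_alt a b dic
instance (a : List String) (b : List String) (dic : List (String × List String)) (out : List String) : Decidable (Spec_UpPart a b dic out) := by unfold Spec_UpPart; infer_instance

-- ===== CLAIM (what is proved, stated in full; the proofs are below) =====
def Claim_equal_UpPart : Prop := ∀ (a : List String) (b : List String) (dic : List (String × List String)), Dom_UpPart a b dic → Pre_UpPart a b dic → Spec_UpPart a b dic (UpPart a b dic)

-- ===== LEMMAS AND PROOFS =====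

-- the keys of dic whose value list contains `third`, in dic order
def keysFor (third : String) (dic : List (String × List String)) : List String :=
  (dic.filter (fun x => third ∈ x.2)).map Prod.fst

-- append-if fold shape
theorem foldl_if_append {α : Type} (p : α → Prop) [DecidablePred p] :
    ∀ (l : List α) (c : List α),
      l.foldl (fun c x => if p x then c ++ [x] else c) c = c ++ l.filter (fun x => decide (p x)) := by
  intro l
  induction l with
  | nil => intro c; simp
  | cons y ys ih =>
    intro c
    by_cases h : p y <;> simp [List.foldl_cons, h, ih]

-- A's inner scan computes keysFor (under unique keys)
theorem A_inner_eq_keysFor (third : String) (dic : List (String × List String))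
    (hnd : (dic.map Prod.fst).Nodup) (c : List String) :
    (PySem.Dict.mk dic).keys.foldl
      (fun c x => if third ∈ (PySem.Dict.mk dic).getD x [] then c ++ [x] else c) c
      = c ++ keysFor third dic := by
  have hkeys : (PySem.Dict.mk dic).keys = dic.map Prod.fst := rfl
  rw [foldl_if_append (fun x => third ∈ (PySem.Dict.mk dic).getD x []), hkeys, List.filter_map]
  congr 1
  unfold keysFor
  congr 1
  apply List.filter_congr
  intro x hx
  have hget : (PySem.Dict.mk dic).getD x.1 [] = x.2 := by
    apply PySem.Dict.getD_of_mem_items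
    · exact hx
    · exact hnd
  simp [Function.comp, hget]

-- nested fold over dic = flat fold over the (value, key) pair list
def revPairs (dic : List (String × List String)) : List (String × String) :=
  dic.flatMap (fun x => (PySem.List.dedup x.2).map (fun v => (v, x.1)))

theorem nested_fold_eq_flat (dic : List (String × List String))
    (d : PySem.Dict String (List String)) :
    dic.foldl (fun rev x =>
      (PySem.List.dedup x.2).foldl (fun rev v =>
        PySem.Dict.modify rev v [] (· ++ [x.1])) rev) d
    = (revPairs dic).foldl (fun rev p =>
        PySem.Dict.modify rev p.1 [] (· ++ [p.2])) d := by
  induction dic generalizing d with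
  | nil => rfl
  | cons x xs ih =>
    simp only [revPairs, List.flatMap_cons, List.foldl_append, List.foldl_cons, List.foldl_map]
    rw [ih]
    rfl

-- a Nodup list filtered by equality with a value
theorem nodup_filter_beq (l : List String) (hnd : l.Nodup) (a : String) :
    l.filter (fun v => v == a) = if a ∈ l then [a] else [] := by
  induction l with
  | nil => simp
  | cons y ys ih =>
    rcases List.nodup_cons.mp hnd with ⟨hy, hys⟩
    by_cases h : y = a
    · subst h
      have h0 : ys.filter (fun v => v == y) = [] := by
        apply List.filter_eq_nil_iff.mpr
        intro v hv
        simp only [beq_iff_eq]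
        intro heq
        exact hy (heq ▸ hv)
      simp [h0]
    · have hmem : (a ∈ y :: ys) = (a ∈ ys) := by
        simp [List.mem_cons, Ne.symm h]
      simp [h, ih hys, hmem]

theorem revPairs_filtered (third : String) (dic : List (String × List String)) :
    ((revPairs dic).filter (fun p => p.1 == third)).map Prod.snd = keysFor third dic := by
  induction dic with
  | nil => rfl
  | cons x xs ih =>
    have h1 : (((PySem.List.dedup x.2).map (fun v => (v, x.1))).filter (fun p => p.1 == third)).map Prod.snd
        = if third ∈ x.2 then [x.1] else [] := by
      rw [List.filter_map,
        show ((fun p : String × String => p.1 == third) ∘ fun v => (v, x.1)) = (fun v => v == third) from rfl]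
      have hf : ((PySem.List.dedup x.2).filter (fun v => v == third)) = if third ∈ PySem.List.dedup x.2 then [third] else [] :=
        nodup_filter_beq _ (PySem.List.nodup_dedup x.2) third
      rw [hf]
      by_cases h : third ∈ x.2 <;> simp [h]
    simp only [revPairs, List.flatMap_cons, List.filter_append, List.map_append]
    rw [h1]
    have ih' : ((xs.flatMap (fun x => (PySem.List.dedup x.2).map (fun v => (v, x.1)))).filter
        (fun p => p.1 == third)).map Prod.snd = keysFor third xs := ih
    rw [ih']
    unfold keysFor
    by_cases h : third ∈ x.2 <;> simp [h]

-- B's reverse index looks up keysFor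
theorem rev_getD_eq_keysFor (third : String) (dic : List (String × List String)) :
    (dic.foldl (fun rev x =>
      (PySem.List.dedup x.2).foldl (fun rev v =>
        PySem.Dict.modify rev v [] (· ++ [x.1])) rev) PySem.Dict.empty).getD third []
    = keysFor third dic := by
  rw [nested_fold_eq_flat, PySem.Dict.getD_foldl_modify_append, revPairs_filtered]
  simp [PySem.Dict.getD_empty]

-- ===== VERDICT (by name: the statement is the Claim_ definition above) =====
theorem UpPart_spec : Claim_equal_UpPart := by
  intro a b dic _ hpre
  unfold Spec_UpPart UpPart UpPart_alt
  simp only []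
  have hfun : (fun (c : List String) (i : String) =>
      b.foldl (fun c j =>
        (PySem.Dict.mk dic).keys.foldl (fun c x =>
          if i ++ j ∈ (PySem.Dict.mk dic).getD x [] then c ++ [x] else c) c) c)
      = (fun (c : List String) (i : String) =>
      b.foldl (fun c j => c ++
        (dic.foldl (fun rev x =>
          (PySem.List.dedup x.2).foldl (fun rev v =>
            PySem.Dict.modify rev v [] (· ++ [x.1])) rev) PySem.Dict.empty).getD (i ++ j) []) c) := by
    funext c i
    congr 1
    funext c j
    rw [A_inner_eq_keysFor (i ++ j) dic hpre, rev_getD_eq_keysFor]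
  rw [hfun]
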